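-- pv_equiv track=rewrite | github.com/tlagore/cryptanalysis_sbox | sub-perm-network.py | _bits_to_str
-- ===== SOURCE A (Python) =====
-- def _bits_to_str(bits):
--     mask = 0xFF
--     ret_str = ""
--
--     while bits != 0:
--         ch = chr(bits & mask)
--         bits = bits >> 8
--         ret_str = ch + ret_str
--
--     return ret_str
-- ===== SOURCE B (Python) =====
-- def _bits_to_str(bits):
--     length = (bits.bit_length() + 7) // 8
--     return bits.to_bytes(length, 'big').decode('latin-1')
-- ===== Notes on version B (the rewrite author's own statement) =====
-- stated objective: idiomatic
-- what changed: Replaces the manual mask-and-shift while-loop that prepends one character at a time with a single big-endian int.to_bytes conversion of computed byte length followed by a latin-1 decode.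
import Mathlib
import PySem

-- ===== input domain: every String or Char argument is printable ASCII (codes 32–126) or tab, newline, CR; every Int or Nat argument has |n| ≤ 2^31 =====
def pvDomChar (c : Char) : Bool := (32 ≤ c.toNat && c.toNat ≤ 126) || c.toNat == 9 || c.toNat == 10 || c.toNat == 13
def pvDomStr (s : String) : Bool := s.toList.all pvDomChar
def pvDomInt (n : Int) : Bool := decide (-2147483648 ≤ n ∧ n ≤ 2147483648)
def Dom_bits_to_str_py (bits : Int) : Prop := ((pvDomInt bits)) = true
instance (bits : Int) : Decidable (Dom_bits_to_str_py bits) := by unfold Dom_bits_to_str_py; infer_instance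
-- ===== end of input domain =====

-- B replaces A's byte-at-a-time mask/shift prepend loop with a computed byte length
-- and a single big-endian bytes conversion (idiomatic; return value equivalence only).

-- ===== PORT A =====
-- A's while-loop: on the nonnegative domain (Pre_), 'bits & 0xFF' is 'bits % 256' and
-- 'bits >> 8' is 'bits / 256' on Nat (exact for Nat); the loop prepends chr of the low byte.
def pvALoop (bits : Nat) (ret : List Char) : List Char :=
  if bits = 0 then ret
  else pvALoop (bits / 256) (Char.ofNat (bits % 256) :: ret)
decreasing_by exact Nat.div_lt_self (Nat.pos_of_ne_zero (by assumption)) (by omega)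

def bits_to_str_py (bits : Int) : String :=
  String.mk (pvALoop bits.toNat [])

-- ===== PORT B =====
-- length = (bits.bit_length() + 7) // 8;  bits.to_bytes(length, 'big') has byte i equal to
-- (bits // 256^(length-1-i)) % 256 (exact big-endian definition); .decode('latin-1') maps
-- each byte b to chr(b), i.e. Char.ofNat.
def bits_to_str_py_alt (bits : Int) : String :=
  let n := bits.toNat
  let length := (PySem.Int.bitLength bits + 7) / 8
  String.mk ((List.range length).map (fun i => Char.ofNat (n / 256 ^ (length - 1 - i) % 256)))

-- ===== PRECONDITION & SPEC =====
-- Pre_ excludes negative bits, on which A's while-loop never terminates (bits >> 8 stalls at -1).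
def Pre_bits_to_str_py (bits : Int) : Prop := 0 ≤ bits
instance (bits : Int) : Decidable (Pre_bits_to_str_py bits) := by unfold Pre_bits_to_str_py; infer_instance
def pvWitness_bits_to_str_py : Int := 4276803

def Spec_bits_to_str_py (bits : Int) (out : String) : Prop := out = bits_to_str_py_alt bits
instance (bits : Int) (out : String) : Decidable (Spec_bits_to_str_py bits out) := by unfold Spec_bits_to_str_py; infer_instance

-- ===== CLAIM (what is proved, stated in full; the proofs are below) =====
def Claim_equal_bits_to_str_py : Prop := ∀ (bits : Int), Dom_bits_to_str_py bits → Pre_bits_to_str_py bits → Spec_bits_to_str_py bits (bits_to_str_py bits)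

-- ===== LEMMAS AND PROOFS =====

-- B's byte list for a nonnegative value n with byte length L.
def pvBytesL (n L : Nat) : List Char :=
  (List.range L).map (fun i => Char.ofNat (n / 256 ^ (L - 1 - i) % 256))
def pvBytes (n : Nat) : List Char := pvBytesL n ((PySem.Int.bitLength (n : Int) + 7) / 8)

lemma pvBitLen_div256 (n : Nat) (h : 256 ≤ n) :
    PySem.Int.bitLength ((n / 256 : Nat) : Int) + 8 = PySem.Int.bitLength (n : Int) := by
  have s3 : n / 2 / 2 / 2 / 2 / 2 / 2 / 2 / 2 = n / 256 := by omega
  rw [PySem.Int.bitLength_natCast (m := n) (by omega),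
      PySem.Int.bitLength_natCast (m := n/2) (by omega),
      PySem.Int.bitLength_natCast (m := n/2/2) (by omega),
      PySem.Int.bitLength_natCast (m := n/2/2/2) (by omega),
      PySem.Int.bitLength_natCast (m := n/2/2/2/2) (by omega),
      PySem.Int.bitLength_natCast (m := n/2/2/2/2/2) (by omega),
      PySem.Int.bitLength_natCast (m := n/2/2/2/2/2/2) (by omega),
      PySem.Int.bitLength_natCast (m := n/2/2/2/2/2/2/2) (by omega), s3]

lemma pvBitLen_small (n : Nat) (h0 : 0 < n) (h : n < 256) :
    (PySem.Int.bitLength (n : Int) + 7) / 8 = 1 := by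
  interval_cases n <;> decide

lemma pvLen_succ (n : Nat) (h : 0 < n) :
    (PySem.Int.bitLength (n : Int) + 7) / 8
      = (PySem.Int.bitLength ((n / 256 : Nat) : Int) + 7) / 8 + 1 := by
  by_cases hb : 256 ≤ n
  · have := pvBitLen_div256 n hb
    omega
  · have h2 : n / 256 = 0 := by omega
    rw [pvBitLen_small n h (by omega), h2]
    simp [PySem.Int.bitLength_zero]

lemma pvBytesL_succ (n L' : Nat) :
    pvBytesL n (L' + 1) = pvBytesL (n / 256) L' ++ [Char.ofNat (n % 256)] := by
  unfold pvBytesL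
  rw [List.range_succ, List.map_append]
  congr 1
  · apply List.map_congr_left
    intro i hi
    have hi' : i < L' := List.mem_range.mp hi
    have he : L' + 1 - 1 - i = (L' - 1 - i) + 1 := by omega
    rw [he, pow_succ, Nat.mul_comm, ← Nat.div_div_eq_div_mul]
  · simp

lemma pvBytes_succ (n : Nat) (h : 0 < n) :
    pvBytes n = pvBytes (n / 256) ++ [Char.ofNat (n % 256)] := by
  unfold pvBytes
  rw [pvLen_succ n h, pvBytesL_succ]

lemma pvALoop_eq (n : Nat) : ∀ acc, pvALoop n acc = pvBytes n ++ acc := by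
  induction n using Nat.strong_induction_on with
  | _ n ih =>
    intro acc
    rw [pvALoop]
    by_cases h : n = 0
    · simp [h, pvBytes, pvBytesL, PySem.Int.bitLength_zero]
    · rw [if_neg h, ih (n / 256) (Nat.div_lt_self (Nat.pos_of_ne_zero h) (by omega)),
          pvBytes_succ n (Nat.pos_of_ne_zero h), List.append_assoc]
      simp

-- ===== VERDICT (by name: the statement is the Claim_ definition above) =====
theorem bits_to_str_py_spec : Claim_equal_bits_to_str_py := by
  intro bits _ hpre
  unfold Spec_bits_to_str_py bits_to_str_py bits_to_str_py_alt
  have hc : (bits.toNat : Int) = bits := Int.toNat_of_nonneg hpre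
  rw [pvALoop_eq bits.toNat []]
  simp only [List.append_nil, pvBytes, pvBytesL, hc]
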